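-- pv_equiv track=rewrite | github.com/synesis-lang/synesis-lsp | synesis_lsp/explorer_requests.py | _split_with_offsets
-- ===== SOURCE A (Python) =====
-- def _split_with_offsets(text: str, delimiter: str) -> list[tuple[str, int]]:
--     segments: list[tuple[str, int]] = []
--     start = 0
--     while True:
--         idx = text.find(delimiter, start)
--         if idx == -1:
--             segments.append((text[start:], start))
--             break
--         segments.append((text[start:idx], start))
--         start = idx + len(delimiter)
--     return segments
-- ===== SOURCE B (Python) =====
-- def _split_with_offsets(text: str, delimiter: str) -> list[tuple[str, int]]:
--     segments = []
--     start = 0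
--     for seg in text.split(delimiter):
--         segments.append((seg, start))
--         start += len(seg) + len(delimiter)
--     return segments
-- ===== Notes on version B (the rewrite author's own statement) =====
-- stated objective: idiomatic
-- what changed: Replaces A's interleaved find/slice while-loop with one library str.split followed by an arithmetic pass that accumulates offsets; Pre_ excludes only delimiter == '', where A loops forever (str.find('') always succeeds at start) and B's str.split raises ValueError.
import Mathlib
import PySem

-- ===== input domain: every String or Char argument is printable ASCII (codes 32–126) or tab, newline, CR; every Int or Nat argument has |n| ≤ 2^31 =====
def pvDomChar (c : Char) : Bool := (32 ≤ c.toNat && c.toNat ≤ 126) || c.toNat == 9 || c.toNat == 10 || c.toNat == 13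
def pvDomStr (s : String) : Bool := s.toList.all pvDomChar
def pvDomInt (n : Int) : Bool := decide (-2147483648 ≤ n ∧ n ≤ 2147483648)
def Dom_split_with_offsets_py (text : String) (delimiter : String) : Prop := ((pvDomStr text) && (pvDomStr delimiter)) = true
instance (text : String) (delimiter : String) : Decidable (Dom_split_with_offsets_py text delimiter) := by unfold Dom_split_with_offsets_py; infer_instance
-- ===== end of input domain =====

-- B replaces A's interleaved find/slice while-loop by one library split plus an arithmetic
-- offset pass; equivalent on every delimiter ≠ "" (on "" A loops forever and B raises).


-- ===== PORT A =====
-- A's while-loop: find the delimiter from `start`, slice, advance past the match.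
-- `fuel = text.length + 1` is a pure termination guard: with delimiter ≠ "" every
-- iteration either ends the loop or increases `start` by ≥ 1 bounded by text.length,
-- so the fuel is never exhausted (the proof shows this).
def splitAuxA (t d : List Char) : Nat → Int → List (String × Int) → List (String × Int)
  | 0, _, acc => acc
  | fuel + 1, start, acc =>
    let idx := PySem.Chars.findFrom t d start none
    if idx = -1 then
      acc ++ [(String.ofList (PySem.Chars.slice t (some start) none), start)]
    else
      splitAuxA t d fuel (idx + d.length)
        (acc ++ [(String.ofList (PySem.Chars.slice t (some start) (some idx)), start)])

def split_with_offsets_py (text : String) (delimiter : String) : List (String × Int) :=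
  splitAuxA text.toList delimiter.toList (text.toList.length + 1) 0 []

-- ===== PORT B =====
-- B: one library split, then an offset-accumulating pass over the parts.
def splitAuxB (dlen : Int) : List (List Char) → Int → List (String × Int)
  | [], _ => []
  | seg :: rest, start => (String.ofList seg, start) :: splitAuxB dlen rest (start + seg.length + dlen)

def split_with_offsets_py_alt (text : String) (delimiter : String) : List (String × Int) :=
  match PySem.Chars.split? text.toList delimiter.toList with
  | none => []   -- text.split("") raises ValueError; excluded by Pre_
  | some parts => splitAuxB delimiter.toList.length parts 0

-- ===== PRECONDITION & SPEC =====
-- Pre_ excludes only delimiter = "": there A's `text.find("", start)` always returns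
-- `start`, so the while-loop never terminates (and B's str.split raises ValueError).
def Pre_split_with_offsets_py (text : String) (delimiter : String) : Prop := delimiter ≠ ""
instance (text : String) (delimiter : String) : Decidable (Pre_split_with_offsets_py text delimiter) := by unfold Pre_split_with_offsets_py; infer_instance

def pvWitness_split_with_offsets_py : String × String := ("a,b,,c", ",")

def Spec_split_with_offsets_py (text : String) (delimiter : String) (out : List (String × Int)) : Prop := out = split_with_offsets_py_alt text delimiter
instance (text : String) (delimiter : String) (out : List (String × Int)) : Decidable (Spec_split_with_offsets_py text delimiter out) := by unfold Spec_split_with_offsets_py; infer_instance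

-- ===== CLAIM (what is proved, stated in full; the proofs are below) =====
def Claim_equal_split_with_offsets_py : Prop := ∀ (text : String) (delimiter : String), Dom_split_with_offsets_py text delimiter → Pre_split_with_offsets_py text delimiter → Spec_split_with_offsets_py text delimiter (split_with_offsets_py text delimiter)

-- ===== LEMMAS AND PROOFS =====

theorem splitOn_go_acc (d : List Char) :
    ∀ (fuel : Nat) (l : List Char) (cur : List Char) (acc : List (List Char)),
      PySem.Chars.splitOn.go d fuel l cur acc = acc.reverse ++ PySem.Chars.splitOn.go d fuel l cur [] := by
  intro fuel
  induction fuel with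
  | zero => intro l cur acc; simp [PySem.Chars.splitOn.go]
  | succ n ih =>
    intro l cur acc
    cases l with
    | nil => simp [PySem.Chars.splitOn.go]
    | cons c rest =>
      by_cases hp : d.isPrefixOf (c :: rest)
      · simp only [PySem.Chars.splitOn.go, hp, if_true]
        rw [ih _ _ (cur.reverse :: acc), ih _ _ [cur.reverse]]
        simp
      · simp only [PySem.Chars.splitOn.go, hp, Bool.false_eq_true, if_false]
        exact ih rest (c :: cur) acc

theorem splitOn_go_fuel (d : List Char) (hd : d ≠ []) :
    ∀ (fuel : Nat) (l : List Char) (cur : List Char) (acc : List (List Char))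
      (fuel' : Nat), l.length < fuel → l.length < fuel' →
      PySem.Chars.splitOn.go d fuel l cur acc = PySem.Chars.splitOn.go d fuel' l cur acc := by
  intro fuel
  induction fuel with
  | zero => intro l cur acc fuel' h h'; omega
  | succ n ih =>
    intro l cur acc fuel' h h'
    cases l with
    | nil => cases fuel' with
      | zero => omega
      | succ m => simp [PySem.Chars.splitOn.go]
    | cons c rest =>
      cases fuel' with
      | zero => omega
      | succ m =>
        by_cases hp : d.isPrefixOf (c :: rest)
        · have hdl : 0 < d.length := List.length_pos_of_ne_nil hd
          have hle : d.length ≤ (c :: rest).length := (List.isPrefixOf_iff_prefix.mp hp).length_le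
          simp only [PySem.Chars.splitOn.go, hp, if_true]
          apply ih <;> simp at h h' hle ⊢ <;> omega
        · simp only [PySem.Chars.splitOn.go, hp, Bool.false_eq_true, if_false]
          apply ih <;> simp at h h' ⊢ <;> omega

theorem splitOn_go_no_match (d : List Char) :
    ∀ (fuel : Nat) (l : List Char) (cur : List Char) (acc : List (List Char)),
      l.length < fuel → ¬ d <:+: l →
      PySem.Chars.splitOn.go d fuel l cur acc = acc.reverse ++ [cur.reverse ++ l] := by
  intro fuel
  induction fuel with
  | zero => intro l cur acc h hn; omega
  | succ n ih =>
    intro l cur acc h hn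
    cases l with
    | nil => simp [PySem.Chars.splitOn.go]
    | cons c rest =>
      have hp : ¬ d.isPrefixOf (c :: rest) = true := by
        intro hp; exact hn (List.isPrefixOf_iff_prefix.mp hp).isInfix
      simp only [PySem.Chars.splitOn.go, hp, Bool.false_eq_true, if_false]
      rw [ih rest (c :: cur) acc (by simp at h ⊢; omega) (fun hi => hn (List.infix_cons hi))]
      simp

theorem splitOn_of_not_infix (d l : List Char) (h : ¬ d <:+: l) :
    PySem.Chars.splitOn l d = [l] := by
  unfold PySem.Chars.splitOn
  rw [splitOn_go_no_match d _ l [] [] (by omega) h]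
  simp

theorem splitOn_go_first_match (d : List Char) (hd : d ≠ []) :
    ∀ (i : Nat) (fuel : Nat) (l : List Char) (cur : List Char) (acc : List (List Char)),
      l.length < fuel → d <+: l.drop i → (∀ j, j < i → ¬ d <+: l.drop j) →
      PySem.Chars.splitOn.go d fuel l cur acc =
        acc.reverse ++ (cur.reverse ++ l.take i) :: PySem.Chars.splitOn (l.drop (i + d.length)) d := by
  intro i
  induction i with
  | zero =>
    intro fuel l cur acc h hm _
    simp only [List.drop_zero] at hm
    have hdl : 0 < d.length := List.length_pos_of_ne_nil hd
    have hle := hm.length_le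
    cases l with
    | nil => exact absurd (List.prefix_nil.mp hm) hd
    | cons c rest =>
      cases fuel with
      | zero => omega
      | succ n =>
        have hp : d.isPrefixOf (c :: rest) = true := List.isPrefixOf_iff_prefix.mpr hm
        simp only [PySem.Chars.splitOn.go, hp, if_true]
        rw [splitOn_go_acc,
            splitOn_go_fuel d hd n (List.drop d.length (c :: rest)) [] []
              (((c :: rest).drop d.length).length + 1) (by simp at h hle ⊢; omega) (by omega)]
        simp [PySem.Chars.splitOn]
  | succ i ih =>
    intro fuel l cur acc h hm hmin
    cases l with
    | nil => simp [List.drop_nil] at hm; simp [hm] at hd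
    | cons c rest =>
      cases fuel with
      | zero => omega
      | succ n =>
        have hp : ¬ d.isPrefixOf (c :: rest) = true := by
          intro hp
          exact hmin 0 (Nat.succ_pos i) (by simpa using List.isPrefixOf_iff_prefix.mp hp)
        simp only [PySem.Chars.splitOn.go, hp, Bool.false_eq_true, if_false]
        rw [ih n rest (c :: cur) acc (by simp at h; omega) (by simpa using hm)
            (fun j hj => by simpa using hmin (j + 1) (by omega))]
        have hdrop : (c :: rest).drop (i + 1 + d.length) = rest.drop (i + d.length) := by
          rw [show i + 1 + d.length = (i + d.length) + 1 from by omega, List.drop_succ_cons]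
        simp [List.take_succ_cons, hdrop]

theorem splitOn_first_match (d l : List Char) (hd : d ≠ []) (i : Nat)
    (h1 : d <+: l.drop i) (h2 : ∀ j, j < i → ¬ d <+: l.drop j) :
    PySem.Chars.splitOn l d = l.take i :: PySem.Chars.splitOn (l.drop (i + d.length)) d := by
  have hdef : PySem.Chars.splitOn l d = PySem.Chars.splitOn.go d (l.length + 1) l [] [] := rfl
  rw [hdef, splitOn_go_first_match d hd i _ l [] [] (by omega) h1 h2]
  simp

theorem main_loop (t d : List Char) (hd : d ≠ []) :
    ∀ (fuel : Nat) (k : Nat) (acc : List (String × Int)),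
      k ≤ t.length → (t.drop k).length < fuel →
      splitAuxA t d fuel (k : Int) acc =
        acc ++ splitAuxB d.length (PySem.Chars.splitOn (t.drop k) d) (k : Int) := by
  intro fuel
  induction fuel with
  | zero => intro k acc h hf; omega
  | succ n ih =>
    intro k acc hk hf
    have hfind := PySem.Chars.findFrom_natCast t d k hk
    have hdl : 0 < d.length := List.length_pos_of_ne_nil hd
    by_cases hcase : PySem.Chars.find (t.drop k) d = -1
    · have hidx : PySem.Chars.findFrom t d (k:Int) none = -1 := by rw [hfind, if_pos hcase]
      have hni : ¬ d <:+: t.drop k := (PySem.Chars.find_eq_neg_one_iff _ _).mp hcase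
      simp only [splitAuxA, hidx]
      rw [splitOn_of_not_infix d _ hni]
      simp [splitAuxB, PySem.Chars.slice, PySem.List.slice_from_natCast]
    · have hinf : d <:+: t.drop k := (PySem.Chars.find_ne_neg_one_iff _ _).mp hcase
      have hnn : 0 ≤ PySem.Chars.find (t.drop k) d := (PySem.Chars.find_nonneg_iff _ _).mpr hinf
      set i : Nat := (PySem.Chars.find (t.drop k) d).toNat with hi
      have hfi : PySem.Chars.find (t.drop k) d = (i : Int) := (Int.toNat_of_nonneg hnn).symm
      have hspec := PySem.Chars.findFrom_natCast_spec (t.drop k) d 0 (by omega)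
        (by simpa [PySem.Chars.findFrom_zero] using hcase)
      simp only [Nat.cast_zero, PySem.Chars.findFrom_zero] at hspec
      obtain ⟨-, hpre, hmin⟩ := hspec
      have hilen : i < (t.drop k).length := by
        by_contra hcon
        rw [not_lt] at hcon
        rw [List.drop_eq_nil_of_le hcon] at hpre
        exact hd (List.prefix_nil.mp hpre)
      have hlen : i + d.length ≤ (t.drop k).length := by
        have h1 := hpre.length_le
        rw [List.length_drop] at h1
        omega
      have hidx : PySem.Chars.findFrom t d (k:Int) none = ((k + i : Nat) : Int) := by
        rw [hfind, if_neg hcase, hfi]; push_cast; ring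
      simp only [splitAuxA, hidx]
      rw [if_neg (by omega)]
      rw [splitOn_first_match d (t.drop k) hd i hpre (fun j hj => hmin j (by omega) hj)]
      have hstart : ((k + i : Nat) : Int) + (d.length : Int) = ((k + i + d.length : Nat) : Int) := by
        push_cast; ring
      rw [hstart]
      have hlend : (t.drop k).length = t.length - k := by simp
      rw [ih (k + i + d.length) _ (by omega) (by simp; omega)]
      have hdrop : (t.drop k).drop (i + d.length) = t.drop (k + i + d.length) := by
        rw [List.drop_drop]; ring_nf
      have htake : ((t.drop k).take i).length = i := by simp; omega
      simp only [splitAuxB, hdrop, PySem.Chars.slice, PySem.List.slice_natCast]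
      have : (k + i) - k = i := by omega
      rw [this]
      simp [htake]


-- ===== VERDICT (by name: the statement is the Claim_ definition above) =====
theorem split_with_offsets_py_spec : Claim_equal_split_with_offsets_py := by
  intro text delimiter _ hpre
  unfold Spec_split_with_offsets_py split_with_offsets_py split_with_offsets_py_alt
  unfold Pre_split_with_offsets_py at hpre
  have hd : delimiter.toList ≠ [] := by simpa using hpre
  have h := main_loop text.toList delimiter.toList hd (text.toList.length + 1) 0 [] (by omega) (by simp)
  simp only [Nat.cast_zero, List.nil_append] at h
  rw [h]
  simp [PySem.Chars.split?, List.isEmpty_iff, hd]
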